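-- pv_equiv track=rewrite | github.com/X03L-git/Proyecto-Narvaez | src/commonfunctions.py | get_line_indices
-- ===== SOURCE A (Python) =====
-- def get_line_indices(hist):
--     indices = []
--     prev = 0
--     for index, val in enumerate(hist):
--         if val > 0 and prev <= 0:
--             indices.append(index)
--         prev = val
--     return indices
-- ===== SOURCE B (Python) =====
-- def get_line_indices(hist):
--     # run-oriented scan: find each maximal run of same sign-key (val > 0),
--     # emit the run's start index when the run is positive
--     indices = []
--     i = 0
--     n = len(hist)
--     while i < n:
--         pos = hist[i] > 0
--         j = i + 1
--         while j < n and (hist[j] > 0) == pos: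
--             j += 1
--         if pos:
--             indices.append(i)
--         i = j
--     return indices
-- ===== Notes on version B (the rewrite author's own statement) =====
-- stated objective: alternative
-- what changed: Replaces per-element rising-edge detection with a prev variable by a run-oriented scan that groups maximal runs of equal (val > 0) key and emits each positive run's start index.
import Mathlib
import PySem

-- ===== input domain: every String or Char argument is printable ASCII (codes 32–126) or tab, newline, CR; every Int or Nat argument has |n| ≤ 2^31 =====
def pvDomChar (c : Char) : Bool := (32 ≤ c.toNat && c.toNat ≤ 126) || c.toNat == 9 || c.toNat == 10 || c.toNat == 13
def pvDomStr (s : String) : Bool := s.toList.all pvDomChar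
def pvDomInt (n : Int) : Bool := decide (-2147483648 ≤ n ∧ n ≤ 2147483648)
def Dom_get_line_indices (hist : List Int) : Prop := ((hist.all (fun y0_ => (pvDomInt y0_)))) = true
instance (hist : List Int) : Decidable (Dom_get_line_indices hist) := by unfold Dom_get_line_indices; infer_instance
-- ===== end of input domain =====

-- B replaces A's per-element rising-edge test (prev variable) by a run-oriented scan
-- that emits each maximal positive run's start index; same cost, different decomposition.

-- ===== PORT A =====
-- the for-loop over enumerate(hist) with state (indices, prev), index carried explicitly
def pvAGo (l : List Int) (index : Int) (prev : Int) (indices : List Int) : List Int :=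
  match l with
  | [] => indices
  | v :: rest =>
      pvAGo rest (index + 1) v (if 0 < v ∧ prev ≤ 0 then indices ++ [index] else indices)

def get_line_indices (hist : List Int) : List Int :=
  pvAGo hist 0 0 []

-- ===== PORT B =====
-- outer while loop: at position i (head x of the suffix), scan the maximal run with the
-- same key (val > 0) (the inner while loop = takeWhile/dropWhile on the tail), emit i if
-- the run is positive, and continue at the run's end
def pvBGo (i : Int) (l : List Int) : List Int :=
  match l with
  | [] => []
  | x :: xs =>
      let pos : Bool := decide (0 < x)
      (if pos then [i] else []) ++
        pvBGo (i + 1 + ((xs.takeWhile (fun v => decide (0 < v) == pos)).length : Int))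
              (xs.dropWhile (fun v => decide (0 < v) == pos))
termination_by l.length
decreasing_by
  simpa using Nat.lt_succ_of_le (List.length_dropWhile_le _ _)

def get_line_indices_alt (hist : List Int) : List Int :=
  pvBGo 0 hist

-- ===== PRECONDITION & SPEC =====
def Spec_get_line_indices (hist : List Int) (out : List Int) : Prop := out = get_line_indices_alt hist
instance (hist : List Int) (out : List Int) : Decidable (Spec_get_line_indices hist out) := by unfold Spec_get_line_indices; infer_instance

-- ===== CLAIM (what is proved, stated in full; the proofs are below) =====
def Claim_equal_get_line_indices : Prop := ∀ (hist : List Int), Dom_get_line_indices hist → Spec_get_line_indices hist (get_line_indices hist)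

-- ===== LEMMAS AND PROOFS =====

-- skipping a leading nonpositive run does not change pvBGo's output
theorem pvBGo_nonpos (xs : List Int) (i : Int) :
    pvBGo i xs =
      pvBGo (i + ((xs.takeWhile (fun v => !decide (0 < v))).length : Int))
            (xs.dropWhile (fun v => !decide (0 < v))) := by
  cases xs with
  | nil => simp [pvBGo]
  | cons y ys =>
      by_cases hy : 0 < y
      · simp [List.takeWhile, List.dropWhile, hy]
      · rw [pvBGo]
        simp [List.takeWhile, List.dropWhile, hy]
        congr 1
        ring

-- main invariant: A's loop from state (i, prev, acc) produces acc ++ B's run scan,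
-- where a positive prev means the current positive run has already been emitted
theorem pvKey (l : List Int) : ∀ (i prev : Int) (acc : List Int),
    pvAGo l i prev acc =
      acc ++ (if 0 < prev
        then pvBGo (i + ((l.takeWhile (fun v => decide (0 < v))).length : Int))
                   (l.dropWhile (fun v => decide (0 < v)))
        else pvBGo i l) := by
  induction l with
  | nil => intro i prev acc; by_cases h : 0 < prev <;> simp [pvAGo, pvBGo, h]
  | cons x xs ih =>
      intro i prev acc
      rw [pvAGo, ih]
      by_cases hx : 0 < x
      · by_cases hp : 0 < prev
        · -- continuing positive run: nothing emitted
          have hnp : ¬ (0 < x ∧ prev ≤ 0) := by omega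
          rw [if_neg hnp, if_pos hx, if_pos hp]
          simp [List.takeWhile, List.dropWhile, hx]
          congr 1
          omega
        · -- rising edge: A emits i, B emits the run start i
          have hyes : (0 < x ∧ prev ≤ 0) := by omega
          rw [if_pos hyes, if_pos hx, if_neg hp]
          rw [pvBGo]
          simp [hx]
        -- run ends / inside a nonpositive run: B skips the nonpositive run
      · have hnp : ¬ (0 < x ∧ prev ≤ 0) := by omega
        by_cases hp : 0 < prev
        · rw [if_neg hnp, if_neg hx, if_pos hp]
          simp [List.takeWhile, List.dropWhile, hx]
          rw [pvBGo]
          simp [hx]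
          rw [pvBGo_nonpos xs (i + 1)]
        · rw [if_neg hnp, if_neg hx, if_neg hp]
          rw [pvBGo]
          simp [hx]
          rw [pvBGo_nonpos xs (i + 1)]

-- ===== VERDICT (by name: the statement is the Claim_ definition above) =====
theorem get_line_indices_spec : Claim_equal_get_line_indices := by
  intro hist _
  unfold Spec_get_line_indices get_line_indices get_line_indices_alt
  rw [pvKey]
  simp
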